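-- pv_equiv track=rewrite | github.com/hamitbugrabayram/AerialPositioning | src/utils/plotting.py | _find_safe_tile_rect
-- ===== SOURCE A (Python) =====
-- from typing import Any, List, Optional, Tuple, cast
--
-- def _find_safe_tile_rect(
--     tile_index: dict,
--     t_left: int,
--     t_right: int,
--     t_top: int,
--     t_bottom: int,
-- ) -> Tuple[int, int, int, int]:
--     """Trims a tile rectangle until every cell has a tile.
--
--     Iteratively removes the edge (left / right / top / bottom)
--     that contains the most missing tiles until the remaining
--     rectangle is fully covered.
--
--     Returns:
--         ``(t_left, t_right, t_top, t_bottom)`` of the safe rect.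
--
--     """
--     max_iter = (t_right - t_left) + (t_bottom - t_top) + 2
--     for _ in range(max_iter):
--         if t_left > t_right or t_top > t_bottom:
--             break
--         missing_left = sum(
--             1 for ty in range(t_top, t_bottom + 1)
--             if (t_left, ty) not in tile_index
--         )
--         missing_right = sum(
--             1 for ty in range(t_top, t_bottom + 1)
--             if (t_right, ty) not in tile_index
--         )
--         missing_top = sum(
--             1 for tx in range(t_left, t_right + 1)
--             if (tx, t_top) not in tile_index
--         )
--         missing_bottom = sum(
--             1 for tx in range(t_left, t_right + 1)
--             if (tx, t_bottom) not in tile_index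
--         )
--         worst = max(missing_left, missing_right, missing_top, missing_bottom)
--         if worst == 0:
--             break
--         if missing_left == worst:
--             t_left += 1
--         elif missing_right == worst:
--             t_right -= 1
--         elif missing_top == worst:
--             t_top += 1
--         else:
--             t_bottom -= 1
--     return t_left, t_right, t_top, t_bottom
-- ===== SOURCE B (Python) =====
-- from typing import Tuple
--
--
-- def _count_le(a, v):
--     """Number of elements of sorted list ``a`` that are <= v (binary search)."""
--     lo, hi = 0, len(a)
--     while lo < hi:
--         mid = (lo + hi) // 2
--         if a[mid] <= v:
--             lo = mid + 1
--         else: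
--             hi = mid
--     return lo
--
--
-- def _find_safe_tile_rect(
--     tile_index: dict,
--     t_left: int,
--     t_right: int,
--     t_top: int,
--     t_bottom: int,
-- ) -> Tuple[int, int, int, int]:
--     # Index the present tiles once: per-column sorted row lists and
--     # per-row sorted column lists; each edge's missing count is then
--     # derived from two binary searches instead of scanning the edge.
--     cols = {}
--     rows = {}
--     for (x, y) in tile_index:
--         cols.setdefault(x, []).append(y)
--         rows.setdefault(y, []).append(x)
--     for v in cols.values():
--         v.sort()
--     for v in rows.values():
--         v.sort()
--
--     def present(d, k, lo, hi):
--         ys = d.get(k, [])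
--         return _count_le(ys, hi) - _count_le(ys, lo - 1)
--
--     while t_left <= t_right and t_top <= t_bottom:
--         h = t_bottom - t_top + 1
--         w = t_right - t_left + 1
--         missing_left = h - present(cols, t_left, t_top, t_bottom)
--         missing_right = h - present(cols, t_right, t_top, t_bottom)
--         missing_top = w - present(rows, t_top, t_left, t_right)
--         missing_bottom = w - present(rows, t_bottom, t_left, t_right)
--         worst = max(missing_left, missing_right, missing_top, missing_bottom)
--         if worst == 0:
--             break
--         if missing_left == worst:
--             t_left += 1
--         elif missing_right == worst:
--             t_right -= 1
--         elif missing_top == worst: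
--             t_top += 1
--         else:
--             t_bottom -= 1
--     return t_left, t_right, t_top, t_bottom
-- ===== Notes on version B (the rewrite author's own statement) =====
-- stated objective: alternative
-- what changed: B indexes the present tiles once into per-column and per-row sorted coordinate lists and derives each edge's missing count from two binary searches, instead of A's re-scanning every cell of all four edges with a dict membership test on every trimming iteration.
import Mathlib
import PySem

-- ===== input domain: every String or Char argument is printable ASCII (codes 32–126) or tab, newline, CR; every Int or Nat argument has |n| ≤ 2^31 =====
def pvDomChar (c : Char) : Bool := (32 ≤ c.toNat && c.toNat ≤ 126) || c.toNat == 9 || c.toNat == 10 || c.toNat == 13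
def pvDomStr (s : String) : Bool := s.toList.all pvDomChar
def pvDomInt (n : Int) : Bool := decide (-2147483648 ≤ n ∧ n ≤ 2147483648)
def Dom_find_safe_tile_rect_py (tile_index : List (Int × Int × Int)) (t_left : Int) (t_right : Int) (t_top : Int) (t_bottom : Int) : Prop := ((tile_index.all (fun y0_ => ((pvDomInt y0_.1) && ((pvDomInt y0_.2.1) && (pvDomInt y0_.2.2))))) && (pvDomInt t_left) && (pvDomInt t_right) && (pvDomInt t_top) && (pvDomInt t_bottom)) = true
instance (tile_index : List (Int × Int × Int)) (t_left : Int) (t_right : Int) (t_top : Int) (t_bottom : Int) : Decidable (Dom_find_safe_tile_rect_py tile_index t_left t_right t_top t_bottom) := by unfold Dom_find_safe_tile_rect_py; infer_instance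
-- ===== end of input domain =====

-- B replaces A's per-iteration edge scans by a one-off index (per-column / per-row sorted
-- coordinate lists) queried with binary search; the return value is proved identical on all inputs.

-- ===== PORT A =====
-- `(x, y) in tile_index` — membership among the dict's keys (first two components).
def memT (tile_index : List (Int × Int × Int)) (x y : Int) : Bool :=
  tile_index.any (fun e => e.1 == x && e.2.1 == y)

-- the `for _ in range(max_iter)` loop of A; fuel = number of remaining range elements
def loopA (ti : List (Int × Int × Int)) : Nat → Int × Int × Int × Int → Int × Int × Int × Int
  | 0, s => s
  | n + 1, (l, r, t, b) =>
    if l > r ∨ t > b then (l, r, t, b)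
    else
      let ml : Int := ((PySem.List.pyRange t (b + 1) 1).countP (fun ty => !(memT ti l ty)) : Nat)
      let mr : Int := ((PySem.List.pyRange t (b + 1) 1).countP (fun ty => !(memT ti r ty)) : Nat)
      let mt : Int := ((PySem.List.pyRange l (r + 1) 1).countP (fun tx => !(memT ti tx t)) : Nat)
      let mb : Int := ((PySem.List.pyRange l (r + 1) 1).countP (fun tx => !(memT ti tx b)) : Nat)
      let worst := max (max (max ml mr) mt) mb
      if worst = 0 then (l, r, t, b)
      else if ml = worst then loopA ti n (l + 1, r, t, b)
      else if mr = worst then loopA ti n (l, r - 1, t, b)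
      else if mt = worst then loopA ti n (l, r, t + 1, b)
      else loopA ti n (l, r, t, b - 1)

def find_safe_tile_rect_py (tile_index : List (Int × Int × Int)) (t_left : Int) (t_right : Int) (t_top : Int) (t_bottom : Int) : Int × Int × Int × Int :=
  loopA tile_index ((t_right - t_left) + (t_bottom - t_top) + 2).toNat (t_left, t_right, t_top, t_bottom)

-- ===== PORT B =====
-- `for (x, y) in tile_index` iterates the dict's KEYS: the distinct (x, y) pairs in first-occurrence order.
def pairsOf (tile_index : List (Int × Int × Int)) : List (Int × Int) :=
  PySem.List.dedup (tile_index.map (fun e => (e.1, e.2.1)))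

-- the build loop: cols.setdefault(x, []).append(y); rows.setdefault(y, []).append(x)
def buildIdx (tile_index : List (Int × Int × Int)) :
    PySem.Dict Int (List Int) × PySem.Dict Int (List Int) :=
  (pairsOf tile_index).foldl
    (fun cr p => (cr.1.modify p.1 [] (· ++ [p.2]), cr.2.modify p.2 [] (· ++ [p.1])))
    (PySem.Dict.empty, PySem.Dict.empty)

-- `for v in d.values(): v.sort()` — each stored list sorted in place, keys untouched
def sortedInt (l : List Int) : List Int := PySem.List.sorted l (fun v => v) false

def sortVals (d : PySem.Dict Int (List Int)) : PySem.Dict Int (List Int) :=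
  PySem.Dict.mk (d.items.map (fun kv => (kv.1, sortedInt kv.2)))

-- _count_le: binary search. The `while lo < hi` loop is ported with a fuel parameter
-- (len a suffices: hi - lo shrinks every pass); indices are nonneg Python ints, so
-- Nat `/` = `//` and `a.getD mid 0` = a[mid] (0 ≤ lo ≤ mid < hi ≤ len a on every call).
def countLeGo (a : List Int) (v : Int) : Nat → Nat → Nat → Nat
  | 0, lo, _ => lo
  | n + 1, lo, hi =>
    if lo < hi then
      let mid := (lo + hi) / 2
      if a.getD mid 0 ≤ v then countLeGo a v n (mid + 1) hi else countLeGo a v n lo mid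
    else lo

def countLe (a : List Int) (v : Int) : Nat := countLeGo a v a.length 0 a.length

-- present(d, k, lo, hi)
def presentCnt (d : PySem.Dict Int (List Int)) (k lo hi : Int) : Int :=
  let ys := d.getD k []
  (countLe ys hi : Int) - (countLe ys (lo - 1) : Int)

-- the while loop of B, ported with a fuel parameter (every pass trims the rectangle's
-- half-perimeter by 1 or returns, so (r-l)+(b-t)+2 passes always suffice)
def loopB (cols rows : PySem.Dict Int (List Int)) : Nat → Int → Int → Int → Int → Int × Int × Int × Int
  | 0, l, r, t, b => (l, r, t, b)
  | n + 1, l, r, t, b =>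
    if l ≤ r ∧ t ≤ b then
      let hgt := b - t + 1
      let wdt := r - l + 1
      let ml := hgt - presentCnt cols l t b
      let mr := hgt - presentCnt cols r t b
      let mt := wdt - presentCnt rows t l r
      let mb := wdt - presentCnt rows b l r
      let worst := max (max (max ml mr) mt) mb
      if worst = 0 then (l, r, t, b)
      else if ml = worst then loopB cols rows n (l + 1) r t b
      else if mr = worst then loopB cols rows n l (r - 1) t b
      else if mt = worst then loopB cols rows n l r (t + 1) b
      else loopB cols rows n l r t (b - 1)
    else (l, r, t, b)

def find_safe_tile_rect_py_alt (tile_index : List (Int × Int × Int)) (t_left : Int) (t_right : Int) (t_top : Int) (t_bottom : Int) : Int × Int × Int × Int :=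
  let idx := buildIdx tile_index
  loopB (sortVals idx.1) (sortVals idx.2) ((t_right - t_left) + (t_bottom - t_top) + 2).toNat t_left t_right t_top t_bottom

-- ===== PRECONDITION & SPEC =====
def Spec_find_safe_tile_rect_py (tile_index : List (Int × Int × Int)) (t_left : Int) (t_right : Int) (t_top : Int) (t_bottom : Int) (out : Int × Int × Int × Int) : Prop := out = find_safe_tile_rect_py_alt tile_index t_left t_right t_top t_bottom
instance (tile_index : List (Int × Int × Int)) (t_left : Int) (t_right : Int) (t_top : Int) (t_bottom : Int) (out : Int × Int × Int × Int) : Decidable (Spec_find_safe_tile_rect_py tile_index t_left t_right t_top t_bottom out) := by unfold Spec_find_safe_tile_rect_py; infer_instance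

-- ===== CLAIM (what is proved, stated in full; the proofs are below) =====
def Claim_equal_find_safe_tile_rect_py : Prop := ∀ (tile_index : List (Int × Int × Int)) (t_left : Int) (t_right : Int) (t_top : Int) (t_bottom : Int), Dom_find_safe_tile_rect_py tile_index t_left t_right t_top t_bottom → Spec_find_safe_tile_rect_py tile_index t_left t_right t_top t_bottom (find_safe_tile_rect_py tile_index t_left t_right t_top t_bottom)

-- ===== LEMMAS AND PROOFS =====

-- a predicate that is true exactly on indices < r is counted by r
lemma countP_index (a : List Int) (p : Int → Bool) (r : Nat) (hr : r ≤ a.length)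
    (h : ∀ (j : Nat) (hj : j < a.length), (p a[j] = true ↔ j < r)) : a.countP p = r := by
  conv_lhs => rw [(List.take_append_drop r a).symm]
  rw [List.countP_append]
  have h1 : (a.take r).countP p = (a.take r).length := by
    rw [List.countP_eq_length]
    intro x hx
    obtain ⟨j, hj, rfl⟩ := List.mem_iff_getElem.1 hx
    have hjr : j < r := by
      rw [List.length_take] at hj; omega
    have hja : j < a.length := by omega
    have he : (a.take r)[j] = a[j]'hja := List.getElem_take
    rw [he]
    exact (h j hja).2 hjr
  have h2 : (a.drop r).countP p = 0 := by
    rw [List.countP_eq_zero]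
    intro x hx
    obtain ⟨j, hj, rfl⟩ := List.mem_iff_getElem.1 hx
    have hja : r + j < a.length := by
      rw [List.length_drop] at hj; omega
    have he : (a.drop r)[j] = a[r + j]'hja := List.getElem_drop
    rw [he]
    intro hp
    have := (h (r + j) hja).1 hp
    omega
  rw [h1, h2, List.length_take]
  omega

lemma countLeGo_eq (a : List Int) (v : Int) (hs : a.Pairwise (· ≤ ·)) :
    ∀ (n lo hi : Nat), hi - lo ≤ n → lo ≤ hi → hi ≤ a.length →
    (∀ (j : Nat) (hj : j < a.length), j < lo → a[j] ≤ v) →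
    (∀ (j : Nat) (hj : j < a.length), hi ≤ j → ¬ a[j] ≤ v) →
    countLeGo a v n lo hi = a.countP (fun y => decide (y ≤ v)) := by
  intro n
  induction n with
  | zero =>
    intro lo hi h1 h2 h3 hlow hhigh
    rw [countLeGo]
    refine (countP_index a _ lo (by omega) ?_).symm
    intro j hj
    simp only [decide_eq_true_eq]
    constructor
    · intro hle
      by_contra hge
      exact hhigh j hj (by omega) hle
    · intro hlt; exact hlow j hj hlt
  | succ n ih =>
    intro lo hi h1 h2 h3 hlow hhigh
    rw [countLeGo]
    by_cases hlt : lo < hi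
    · rw [if_pos hlt]
      have hml : lo ≤ (lo + hi) / 2 := by omega
      have hmh : (lo + hi) / 2 < hi := by omega
      have hmlen : (lo + hi) / 2 < a.length := by omega
      have hget : a.getD ((lo + hi) / 2) 0 = a[(lo + hi) / 2]'hmlen :=
        List.getD_eq_getElem a 0 hmlen
      simp only [hget]
      by_cases hc : a[(lo + hi) / 2]'hmlen ≤ v
      · rw [if_pos hc]
        refine ih ((lo + hi) / 2 + 1) hi (by omega) (by omega) h3 ?_ hhigh
        intro j hj hjlt
        rcases Nat.lt_or_ge j ((lo + hi) / 2) with hj2 | hj2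
        · exact le_trans (List.pairwise_iff_getElem.1 hs j ((lo + hi) / 2) hj hmlen hj2) hc
        · have : j = (lo + hi) / 2 := by omega
          subst this; exact hc
      · rw [if_neg hc]
        refine ih lo ((lo + hi) / 2) (by omega) (by omega) (by omega) hlow ?_
        intro j hj hjge hle
        rcases Nat.lt_or_ge ((lo + hi) / 2) j with hj2 | hj2
        · exact hc (le_trans (List.pairwise_iff_getElem.1 hs ((lo + hi) / 2) j hmlen hj hj2) hle)
        · have : j = (lo + hi) / 2 := by omega
          subst this; exact hc hle
    · rw [if_neg hlt]
      refine (countP_index a _ lo (by omega) ?_).symm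
      intro j hj
      simp only [decide_eq_true_eq]
      constructor
      · intro hle
        by_contra hge
        exact hhigh j hj (by omega) hle
      · intro hlt'; exact hlow j hj hlt'

lemma countLe_eq (a : List Int) (v : Int) (hs : a.Pairwise (· ≤ ·)) :
    countLe a v = a.countP (fun y => decide (y ≤ v)) := by
  refine countLeGo_eq a v hs a.length 0 a.length (by omega) (by omega) (le_refl _) ?_ ?_
  · intro j hj h; omega
  · intro j hj h; omega

lemma countP_split (l : List Int) (p q r : Int → Bool)
    (h : ∀ y ∈ l, (p y = true ↔ (q y = true ∨ r y = true)) ∧ ¬(q y = true ∧ r y = true)) :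
    l.countP p = l.countP q + l.countP r := by
  induction l with
  | nil => simp
  | cons x xs ih =>
    have hx := h x (by simp)
    have hxs := fun y hy => h y (List.mem_cons_of_mem x hy)
    simp only [List.countP_cons]
    rw [ih hxs]
    rcases hq : q x <;> rcases hr : r x <;>
      simp [hq, hr] at hx ⊢ <;> simp [hx] <;> omega

-- the central counting identity: missing cells on an edge segment [t, b] versus
-- two binary-searched prefix counts in the sorted present-coordinate list
lemma edge_count (L : List Int) (hnd : L.Nodup) (P : Int → Bool)
    (hm : ∀ z, z ∈ L ↔ P z = true) (t b : Int) (htb : t ≤ b) :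
    (((PySem.List.pyRange t (b + 1) 1).countP (fun z => !(P z)) : Nat) : Int)
      = (b - t + 1) - ((countLe (sortedInt L) b : Int) - (countLe (sortedInt L) (t - 1) : Int)) := by
  set S := sortedInt L with hS
  have hperm : S.Perm L := PySem.List.sorted_perm L (fun v => v) false
  have hp : S.Pairwise (· ≤ ·) := PySem.List.sorted_pairwise L (fun v => v)
  have hSnd : S.Nodup := (hperm.nodup_iff).2 hnd
  have hSm : ∀ z, z ∈ S ↔ P z = true := by
    intro z; rw [hperm.mem_iff]; exact hm z
  have h1 : countLe S b = S.countP (fun y => decide (y ≤ b)) := countLe_eq S b hp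
  have h2 : countLe S (t - 1) = S.countP (fun y => decide (y ≤ t - 1)) := countLe_eq S (t - 1) hp
  have h3 : S.countP (fun y => decide (y ≤ b))
      = S.countP (fun y => decide (y ≤ t - 1)) + S.countP (fun y => decide (t ≤ y ∧ y ≤ b)) := by
    refine countP_split S _ _ _ ?_
    intro y _
    simp only [decide_eq_true_eq]
    constructor
    · constructor
      · intro hyb; omega
      · intro hor; omega
    · intro hand; omega
  have h4 : S.countP (fun y => decide (t ≤ y ∧ y ≤ b))
      = (PySem.List.pyRange t (b + 1) 1).countP P := by
    rw [List.countP_eq_length_filter, List.countP_eq_length_filter]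
    refine List.Perm.length_eq ?_
    refine (List.perm_ext_iff_of_nodup (hSnd.filter _) ((PySem.List.nodup_pyRange_one t (b + 1)).filter _)).2 ?_
    intro z
    simp only [List.mem_filter, PySem.List.mem_pyRange_one, decide_eq_true_eq, hSm]
    constructor
    · rintro ⟨hz, ht', hb'⟩; exact ⟨⟨ht', by omega⟩, hz⟩
    · rintro ⟨⟨ht', hb'⟩, hz⟩; exact ⟨hz, ht', by omega⟩
  have h5 : (PySem.List.pyRange t (b + 1) 1).countP (fun z => !(P z))
        + (PySem.List.pyRange t (b + 1) 1).countP P = (b + 1 - t).toNat := by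
    rw [← PySem.List.length_pyRange_one t (b + 1)]
    have h := List.length_eq_countP_add_countP (l := PySem.List.pyRange t (b + 1) 1) (p := P)
    have heq : (PySem.List.pyRange t (b + 1) 1).countP (fun a => decide ¬(P a = true))
        = (PySem.List.pyRange t (b + 1) 1).countP (fun z => !(P z)) :=
      List.countP_congr (fun x _ => by cases P x <;> simp)
    omega
  rw [h1, h2, h3, h4]
  omega

-- characterisation of the built per-column / per-row dicts
lemma build_fst (ti : List (Int × Int × Int)) :
    (buildIdx ti).1 = (pairsOf ti).foldl
      (fun d p => d.modify p.1 [] (· ++ [p.2])) PySem.Dict.empty := by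
  unfold buildIdx
  rw [PySem.List.foldl_prod_mk
    (f := fun (d : PySem.Dict Int (List Int)) (p : Int × Int) => d.modify p.1 [] (· ++ [p.2]))
    (g := fun (d : PySem.Dict Int (List Int)) (p : Int × Int) => d.modify p.2 [] (· ++ [p.1]))]

lemma build_snd (ti : List (Int × Int × Int)) :
    (buildIdx ti).2 = (pairsOf ti).foldl
      (fun d p => d.modify p.2 [] (· ++ [p.1])) PySem.Dict.empty := by
  unfold buildIdx
  rw [PySem.List.foldl_prod_mk
    (f := fun (d : PySem.Dict Int (List Int)) (p : Int × Int) => d.modify p.1 [] (· ++ [p.2]))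
    (g := fun (d : PySem.Dict Int (List Int)) (p : Int × Int) => d.modify p.2 [] (· ++ [p.1]))]

lemma cols_getD (ti : List (Int × Int × Int)) (x : Int) :
    ((buildIdx ti).1).getD x [] = ((pairsOf ti).filter (fun p => p.1 == x)).map (·.2) := by
  rw [build_fst, PySem.Dict.getD_foldl_modify_append, PySem.Dict.getD_empty]
  simp

lemma rows_getD (ti : List (Int × Int × Int)) (y : Int) :
    ((buildIdx ti).2).getD y [] = ((pairsOf ti).filter (fun p => p.2 == y)).map (·.1) := by
  rw [build_snd]
  have hswap : (pairsOf ti).foldl (fun d p => d.modify p.2 [] (· ++ [p.1])) PySem.Dict.empty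
      = ((pairsOf ti).map (fun p => (p.2, p.1))).foldl
          (fun d p => d.modify p.1 [] (· ++ [p.2])) PySem.Dict.empty := by
    rw [List.foldl_map]
  rw [hswap, PySem.Dict.getD_foldl_modify_append, PySem.Dict.getD_empty]
  simp [List.filter_map, List.map_map, Function.comp_def]

lemma get?_sortVals (d : PySem.Dict Int (List Int)) (x : Int) :
    (sortVals d).get? x = (d.get? x).map sortedInt := by
  obtain ⟨l⟩ := d
  induction l with
  | nil => rfl
  | cons kv rest ih =>
    show (PySem.Dict.mk ((kv.1, sortedInt kv.2) :: rest.map (fun kv => (kv.1, sortedInt kv.2)))).get? x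
        = ((PySem.Dict.mk (kv :: rest)).get? x).map sortedInt
    rw [PySem.Dict.get?_mk_cons, PySem.Dict.get?_mk_cons]
    by_cases h : kv.1 == x
    · simp [h]
    · simp only [h, Bool.false_eq_true, if_false]
      exact ih

lemma getD_sortVals (d : PySem.Dict Int (List Int)) (x : Int) :
    (sortVals d).getD x [] = sortedInt (d.getD x []) := by
  rw [PySem.Dict.getD_eq_get?_getD, PySem.Dict.getD_eq_get?_getD, get?_sortVals]
  cases d.get? x with
  | none => simp [sortedInt, PySem.List.sorted_eq_nil_iff]
  | some v => simp

lemma nodup_pairsOf (ti : List (Int × Int × Int)) : (pairsOf ti).Nodup :=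
  PySem.List.nodup_dedup _

lemma mem_pairsOf (ti : List (Int × Int × Int)) (x z : Int) :
    (x, z) ∈ pairsOf ti ↔ memT ti x z = true := by
  simp only [pairsOf, PySem.List.mem_dedup, List.mem_map, memT, List.any_eq_true,
    Bool.and_eq_true, beq_iff_eq]
  constructor
  · rintro ⟨e, he, hx⟩
    exact ⟨e, he, congrArg Prod.fst hx, congrArg (fun p => p.2) hx⟩
  · rintro ⟨e, he, h1, h2⟩
    exact ⟨e, he, by rw [h1, h2]⟩

lemma mem_colsList (ti : List (Int × Int × Int)) (x z : Int) :
    z ∈ ((pairsOf ti).filter (fun p => p.1 == x)).map (·.2) ↔ memT ti x z = true := by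
  rw [← mem_pairsOf]
  simp only [List.mem_map, List.mem_filter, beq_iff_eq]
  constructor
  · rintro ⟨p, ⟨hp, h1⟩, h2⟩
    have : p = (x, z) := by
      cases p; simp_all
    rwa [this] at hp
  · intro h
    exact ⟨(x, z), ⟨h, rfl⟩, rfl⟩

lemma mem_rowsList (ti : List (Int × Int × Int)) (y z : Int) :
    z ∈ ((pairsOf ti).filter (fun p => p.2 == y)).map (·.1) ↔ memT ti z y = true := by
  rw [← mem_pairsOf]
  simp only [List.mem_map, List.mem_filter, beq_iff_eq]
  constructor
  · rintro ⟨p, ⟨hp, h1⟩, h2⟩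
    have : p = (z, y) := by
      cases p; simp_all
    rwa [this] at hp
  · intro h
    exact ⟨(z, y), ⟨h, rfl⟩, rfl⟩

lemma nodup_colsList (ti : List (Int × Int × Int)) (x : Int) :
    (((pairsOf ti).filter (fun p => p.1 == x)).map (·.2)).Nodup := by
  refine List.Nodup.map_on ?_ ((nodup_pairsOf ti).filter _)
  intro p hp q hq h2
  have hp1 : p.1 = x := by
    have := List.of_mem_filter hp; simpa using this
  have hq1 : q.1 = x := by
    have := List.of_mem_filter hq; simpa using this
  exact Prod.ext_iff.2 ⟨hp1.trans hq1.symm, h2⟩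

lemma nodup_rowsList (ti : List (Int × Int × Int)) (y : Int) :
    (((pairsOf ti).filter (fun p => p.2 == y)).map (·.1)).Nodup := by
  refine List.Nodup.map_on ?_ ((nodup_pairsOf ti).filter _)
  intro p hp q hq h2
  have hp1 : p.2 = y := by
    have := List.of_mem_filter hp; simpa using this
  have hq1 : q.2 = y := by
    have := List.of_mem_filter hq; simpa using this
  exact Prod.ext_iff.2 ⟨h2, hp1.trans hq1.symm⟩

lemma col_edge (ti : List (Int × Int × Int)) (x t b : Int) (htb : t ≤ b) :
    (((PySem.List.pyRange t (b + 1) 1).countP (fun ty => !(memT ti x ty)) : Nat) : Int)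
      = (b - t + 1) - presentCnt (sortVals (buildIdx ti).1) x t b := by
  have hgd : (sortVals (buildIdx ti).1).getD x []
      = sortedInt (((pairsOf ti).filter (fun p => p.1 == x)).map (·.2)) := by
    rw [getD_sortVals, cols_getD]
  simp only [presentCnt, hgd]
  exact edge_count _ (nodup_colsList ti x) _ (mem_colsList ti x) t b htb

lemma row_edge (ti : List (Int × Int × Int)) (y l r : Int) (hlr : l ≤ r) :
    (((PySem.List.pyRange l (r + 1) 1).countP (fun tx => !(memT ti tx y)) : Nat) : Int)
      = (r - l + 1) - presentCnt (sortVals (buildIdx ti).2) y l r := by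
  have hgd : (sortVals (buildIdx ti).2).getD y []
      = sortedInt (((pairsOf ti).filter (fun p => p.2 == y)).map (·.1)) := by
    rw [getD_sortVals, rows_getD]
  simp only [presentCnt, hgd]
  exact edge_count _ (nodup_rowsList ti y) _ (mem_rowsList ti y) l r hlr

-- the two loops agree pass for pass (they consume the same fuel)
lemma loopAB (ti : List (Int × Int × Int)) :
    ∀ (n : Nat) (l r t b : Int),
    loopA ti n (l, r, t, b)
      = loopB (sortVals (buildIdx ti).1) (sortVals (buildIdx ti).2) n l r t b := by
  intro n
  induction n with
  | zero =>
    intro l r t b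
    rw [loopA, loopB]
  | succ n ih =>
    intro l r t b
    rw [loopA, loopB]
    by_cases hc : l ≤ r ∧ t ≤ b
    · rw [if_neg (by omega : ¬ (l > r ∨ t > b)), if_pos hc]
      simp only [col_edge ti l t b hc.2, col_edge ti r t b hc.2,
        row_edge ti t l r hc.1, row_edge ti b l r hc.1]
      split_ifs
      · rfl
      · exact ih (l + 1) r t b
      · exact ih l (r - 1) t b
      · exact ih l r (t + 1) b
      · exact ih l r t (b - 1)
    · rw [if_pos (by omega : l > r ∨ t > b), if_neg hc]

-- ===== VERDICT (by name: the statement is the Claim_ definition above) =====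
theorem find_safe_tile_rect_py_spec : Claim_equal_find_safe_tile_rect_py := by
  intro ti l r t b _hd
  show find_safe_tile_rect_py ti l r t b = find_safe_tile_rect_py_alt ti l r t b
  unfold find_safe_tile_rect_py find_safe_tile_rect_py_alt
  exact loopAB ti _ l r t b
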